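-- pv_equiv track=rewrite | github.com/anhpt1997/inverse_text_norm | inverse_text_normalization/read_viet_nam_number.py | mergeSingleToken
-- ===== SOURCE A (Python) =====
-- def mergeSingleToken(segment):
--     list_token = segment.split()
--     result , temp = [] , []
--     for token in list_token :
--         if len(token) > 1:
--             if temp != []:
--                 result.append("".join(temp).upper())
--                 temp = []
--             result.append(token)
--         else:
--             temp.append(token)
--     if temp != []:
--         result.append(''.join(temp).upper())
--     return "".join(result)
-- ===== SOURCE B (Python) =====
-- def mergeSingleToken(segment):
--     tokens = segment.split()
--     out = []
--     i, n = 0, len(tokens)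
--     while i < n:
--         if len(tokens[i]) > 1:
--             out.append(tokens[i])
--             i += 1
--         else:
--             j = i
--             while j < n and not len(tokens[j]) > 1:
--                 j += 1
--             out.append(''.join(tokens[i:j]).upper())
--             i = j
--     return ''.join(out)
-- ===== Notes on version B (the rewrite author's own statement) =====
-- stated objective: alternative
-- what changed: Replaces A's accumulate-and-flush temp buffer (with a trailing flush after the loop) by a run-based pass: an index scan that finds each maximal run of single-char tokens and emits it joined and uppercased in one step.
import Mathlib
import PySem

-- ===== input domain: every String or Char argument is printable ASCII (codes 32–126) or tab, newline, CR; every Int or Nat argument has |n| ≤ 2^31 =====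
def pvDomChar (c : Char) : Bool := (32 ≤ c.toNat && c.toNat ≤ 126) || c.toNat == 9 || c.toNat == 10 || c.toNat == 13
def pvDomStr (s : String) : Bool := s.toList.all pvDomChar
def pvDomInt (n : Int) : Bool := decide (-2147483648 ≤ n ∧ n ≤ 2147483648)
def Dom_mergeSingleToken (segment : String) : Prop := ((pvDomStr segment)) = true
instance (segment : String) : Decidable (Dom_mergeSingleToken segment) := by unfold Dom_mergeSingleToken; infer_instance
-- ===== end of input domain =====

-- B replaces A's accumulate-and-flush temp buffer by a run-based pass over maximal
-- runs of single-char tokens (objective: alternative decomposition, same cost).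

-- ===== PORT A =====
-- one loop step of A: state = (result, temp)
def pvStepA (st : List String × List String) (token : String) : List String × List String :=
  let result := st.1
  let temp := st.2
  if PySem.Str.len token > 1 then
    let result := if temp ≠ [] then result ++ [PySem.Str.upper (PySem.Str.join "" temp)] else result
    (result ++ [token], [])
  else
    (result, temp ++ [token])

def mergeSingleToken (segment : String) : String :=
  let listToken := PySem.Str.split₀ segment
  let st := listToken.foldl pvStepA ([], [])
  let result := if st.2 ≠ [] then st.1 ++ [PySem.Str.upper (PySem.Str.join "" st.2)] else st.1
  PySem.Str.join "" result

-- ===== PORT B =====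
-- token belongs to a single-char run exactly when ¬ len(token) > 1 (B's inner-while guard)
def pvMulti (t : String) : Bool := decide (PySem.Str.len t > 1)

-- termination of B's run scan: the inner while consumes at least the head token
theorem pvRunsB_dec (t : String) (rest : List String) (h : ¬ PySem.Str.len t > 1) :
    (List.dropWhile (fun x => !pvMulti x) (t :: rest)).length < (t :: rest).length := by
  have h1 : (!pvMulti t) = true := by
    simp only [pvMulti, Bool.not_eq_true', decide_eq_false_iff_not]; exact h
  simp only [List.dropWhile_cons, h1, if_true]
  have := List.length_dropWhile_le (fun x => !pvMulti x) rest
  simp only [List.length_cons]; omega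

-- B's index loop: emit a multi-char token as is, otherwise scan the maximal
-- single-char run (tokens[i:j]), join it, uppercase it, and jump past it
def pvRunsB : List String → List String
  | [] => []
  | t :: rest =>
    if h : PySem.Str.len t > 1 then t :: pvRunsB rest  -- h names B's branch test for the termination proof
    else
      PySem.Str.upper (PySem.Str.join "" (List.takeWhile (fun x => !pvMulti x) (t :: rest))) ::
        pvRunsB (List.dropWhile (fun x => !pvMulti x) (t :: rest))
termination_by ts => ts.length
decreasing_by
  · simp
  · exact pvRunsB_dec t rest h

def mergeSingleToken_alt (segment : String) : String :=
  PySem.Str.join "" (pvRunsB (PySem.Str.split₀ segment))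

-- ===== PRECONDITION & SPEC =====
def Spec_mergeSingleToken (segment : String) (out : String) : Prop := out = mergeSingleToken_alt segment
instance (segment : String) (out : String) : Decidable (Spec_mergeSingleToken segment out) := by unfold Spec_mergeSingleToken; infer_instance

-- ===== CLAIM (what is proved, stated in full; the proofs are below) =====
def Claim_equal_mergeSingleToken : Prop := ∀ (segment : String), Dom_mergeSingleToken segment → Spec_mergeSingleToken segment (mergeSingleToken segment)

-- ===== LEMMAS AND PROOFS =====

theorem pvKeep {x : String} (hx : ¬ PySem.Str.len x > 1) : (fun y => !pvMulti y) x = true := by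
  simp only [pvMulti, Bool.not_eq_true', decide_eq_false_iff_not]; exact hx

-- proof-only helpers
def pvFlush (temp : List String) : List String :=
  if temp ≠ [] then [PySem.Str.upper (PySem.Str.join "" temp)] else []

def pvGlue : List String → List String → List String
  | temp, [] => pvFlush temp
  | temp, t :: rest =>
    if PySem.Str.len t > 1 then pvFlush temp ++ t :: pvGlue [] rest
    else pvGlue (temp ++ [t]) rest

-- A's fold, finished with the trailing flush, equals pvGlue
theorem pvFoldA_eq (ts : List String) : ∀ (result temp : List String),
    (if (ts.foldl pvStepA (result, temp)).2 ≠ [] then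
        (ts.foldl pvStepA (result, temp)).1 ++
          [PySem.Str.upper (PySem.Str.join "" (ts.foldl pvStepA (result, temp)).2)]
      else (ts.foldl pvStepA (result, temp)).1)
    = result ++ pvGlue temp ts := by
  induction ts with
  | nil =>
    intro result temp
    simp only [List.foldl_nil, pvGlue, pvFlush]
    split <;> simp
  | cons t rest ih =>
    intro result temp
    simp only [List.foldl_cons, pvStepA, pvGlue]
    by_cases h : PySem.Str.len t > 1
    · simp only [h, if_true]
      rw [ih]
      by_cases ht : temp ≠ [] <;> simp [pvFlush, ht]
    · simp only [h, if_false]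
      rw [ih]

-- pvGlue with a pending all-single buffer equals B's run pass on buffer ++ rest
theorem pvGlue_eq_runs (ts : List String) : ∀ (temp : List String),
    (∀ x ∈ temp, ¬ PySem.Str.len x > 1) → pvGlue temp ts = pvRunsB (temp ++ ts) := by
  induction ts with
  | nil =>
    intro temp htemp
    match temp, htemp with
    | [], _ => simp [pvGlue, pvFlush, pvRunsB]
    | x :: xs, htemp =>
      simp only [pvGlue, pvFlush, List.append_nil]
      rw [pvRunsB]
      have hx : ¬ PySem.Str.len x > 1 := htemp x (by simp)
      rw [dif_neg hx]
      have htake : List.takeWhile (fun y => !pvMulti y) (x :: xs) = x :: xs :=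
        List.takeWhile_eq_self_iff.mpr (fun a ha => pvKeep (htemp a ha))
      have hdrop : List.dropWhile (fun y => !pvMulti y) (x :: xs) = [] :=
        List.dropWhile_eq_nil_iff.mpr (fun a ha => pvKeep (htemp a ha))
      rw [htake, hdrop]
      simp [pvRunsB]
  | cons t rest ih =>
    intro temp htemp
    by_cases h : PySem.Str.len t > 1
    · match temp, htemp with
      | [], _ =>
        simp only [pvGlue, List.nil_append]
        rw [if_pos h, pvRunsB, dif_pos h, pvFlush]
        simp [ih [] (by simp)]
      | x :: xs, htemp =>
        simp only [pvGlue]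
        rw [if_pos h, pvFlush, if_pos (by simp)]
        have hx : ¬ PySem.Str.len x > 1 := htemp x (by simp)
        have hcons : (x :: xs) ++ t :: rest = x :: (xs ++ t :: rest) := by simp
        rw [hcons, pvRunsB, dif_neg hx]
        have htake : List.takeWhile (fun y => !pvMulti y) (x :: (xs ++ t :: rest))
            = x :: xs := by
          rw [show x :: (xs ++ t :: rest) = (x :: xs) ++ t :: rest by simp,
              List.takeWhile_append]
          rw [List.takeWhile_eq_self_iff.mpr (fun a ha => pvKeep (htemp a ha))]
          simp only [reduceIte]
          rw [List.takeWhile_cons_of_neg (by simpa [pvMulti] using h)]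
          simp
        have hdrop : List.dropWhile (fun y => !pvMulti y) (x :: (xs ++ t :: rest))
            = t :: rest := by
          rw [show x :: (xs ++ t :: rest) = (x :: xs) ++ t :: rest by simp,
              List.dropWhile_append]
          rw [List.dropWhile_eq_nil_iff.mpr (fun a ha => pvKeep (htemp a ha))]
          simp only [List.isEmpty_nil, if_true]
          rw [List.dropWhile_cons_of_neg (by simpa [pvMulti] using h)]
        rw [htake, hdrop]
        have : pvRunsB (t :: rest) = t :: pvRunsB rest := by rw [pvRunsB, dif_pos h]
        rw [this, ih [] (by simp)]
        simp
    · simp only [pvGlue]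
      rw [if_neg h, ih (temp ++ [t])
        (by intro a ha; rcases List.mem_append.mp ha with h1 | h1
            · exact htemp a h1
            · simp at h1; subst h1; exact h)]
      simp

-- ===== VERDICT (by name: the statement is the Claim_ definition above) =====
theorem mergeSingleToken_spec : Claim_equal_mergeSingleToken := by
  intro segment _
  unfold Spec_mergeSingleToken mergeSingleToken mergeSingleToken_alt
  simp only []
  rw [pvFoldA_eq (PySem.Str.split₀ segment) [] []]
  rw [pvGlue_eq_runs (PySem.Str.split₀ segment) [] (by simp)]
  simp
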